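-- pv_equiv track=rewrite | github.com/dpolasky/Run_scripts | Fragpipe_Batch_Runner.py | update_folder_linux
-- ===== SOURCE A (Python) =====
-- def update_folder_linux(folder_name):
--     """
--     helper to auto update windows directories to linux
--     :param folder_name: path to update
--     :return: updated path
--     """
--     # folder_name = folder_name.replace('\\\\', '\\')
--     if '//corexfs' in folder_name:
--         linux_name = folder_name.replace('//corexfs.med.umich.edu/proteomics', '/storage')
--         linux_name = linux_name.replace('\\', '/')
--     elif '\\corexfs' in folder_name:
--         folder_name = folder_name.replace('\\', '/')
--         while '//' in folder_name:
--             folder_name = folder_name.replace('//', '/')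
--         linux_name = folder_name.replace('/corexfs.med.umich.edu/proteomics', '/storage')
--     elif '=Z:' in folder_name:
--         linux_name = folder_name.replace('Z:', '/storage')
--         linux_name = linux_name.replace('\\', '/')
--     elif 'Z:\\' in folder_name:
--         linux_name = folder_name.replace('Z:', '/storage')
--         linux_name = linux_name.replace('\\', '/')
--     elif 'Z\\:' in folder_name:
--         linux_name = folder_name.replace('Z\\:', '/storage')
--         linux_name = linux_name.replace('\\', '/')
--         linux_name = linux_name.replace('//', '/')
--     elif 'C\\:' in folder_name:
--         linux_name = folder_name.replace('C\\:', '')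
--         linux_name = linux_name.replace('\\', '/')
--         linux_name = linux_name.replace('//', '/')
--     else:
--         linux_name = folder_name
--     return linux_name
-- ===== SOURCE B (Python) =====
-- # One fused left-to-right scan per branch (marker replacement + backslash conversion +
-- # slash-run collapse done in a single sweep) instead of A's chained str.replace passes.
--
-- def _swap_scan(s, old, new):
--     # one pass: replace `old` at leftmost-match positions and convert '\' to '/' in the same sweep
--     out = []
--     i = 0
--     while i < len(s):
--         if s.startswith(old, i):
--             out.append(new)
--             i += len(old)
--         elif s[i] == '\\':
--             out.append('/')
--             i += 1
--         else:
--             out.append(s[i])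
--             i += 1
--     return ''.join(out)
--
--
-- def _swap_collapse(s):
--     # one pass: convert '\' to '/' and collapse every run of slashes to a single '/'
--     out = []
--     prev_slash = False
--     for c in s:
--         if c == '\\':
--             c = '/'
--         if c == '/' and prev_slash:
--             continue
--         out.append(c)
--         prev_slash = (c == '/')
--     return ''.join(out)
--
--
-- def update_folder_linux(folder_name):
--     if '//corexfs' in folder_name:
--         return _swap_scan(folder_name, '//corexfs.med.umich.edu/proteomics', '/storage')
--     if '\\corexfs' in folder_name:
--         return _swap_collapse(folder_name).replace('/corexfs.med.umich.edu/proteomics', '/storage')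
--     if '=Z:' in folder_name or 'Z:\\' in folder_name:
--         return _swap_scan(folder_name, 'Z:', '/storage')
--     if 'Z\\:' in folder_name:
--         return _swap_scan(folder_name, 'Z\\:', '/storage').replace('//', '/')
--     if 'C\\:' in folder_name:
--         return _swap_scan(folder_name, 'C\\:', '').replace('//', '/')
--     return folder_name
-- ===== Notes on version B (the rewrite author's own statement) =====
-- stated objective: alternative
-- what changed: Each branch's chain of str.replace passes (and the '//' collapse while-loop) is fused into a single left-to-right scan of the input that replaces the marker, converts backslashes and collapses slash runs in one sweep; the two identical Z: branches are merged.
import Mathlib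
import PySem

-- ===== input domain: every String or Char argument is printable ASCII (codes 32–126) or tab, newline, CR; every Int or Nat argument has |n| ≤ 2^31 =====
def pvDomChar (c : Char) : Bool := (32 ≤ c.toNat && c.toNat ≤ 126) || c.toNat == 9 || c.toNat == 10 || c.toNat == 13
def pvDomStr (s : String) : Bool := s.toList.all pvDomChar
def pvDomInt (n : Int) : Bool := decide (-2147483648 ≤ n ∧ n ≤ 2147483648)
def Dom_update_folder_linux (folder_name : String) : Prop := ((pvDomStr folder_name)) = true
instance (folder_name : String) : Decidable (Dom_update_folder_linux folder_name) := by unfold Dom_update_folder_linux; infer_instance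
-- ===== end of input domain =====

-- B fuses each branch's chain of str.replace passes (and the '//' while-loop) into a single
-- left-to-right scan of the input (objective: alternative, same asymptotic cost).

-- ===== PORT A =====
-- the `while '//' in s: s = s.replace('//', '/')` loop; fuel = s.length bounds its
-- iteration count (each pass with '//' present strictly shrinks s), so it is exact
def pvCollapse : Nat → String → String
  | 0, s => s
  | n + 1, s =>
      if PySem.Str.isIn "//" s then pvCollapse n (PySem.Str.replace s "//" "/") else s

def update_folder_linux (folder_name : String) : String :=
  if PySem.Str.isIn "//corexfs" folder_name then
    let l := PySem.Str.replace folder_name "//corexfs.med.umich.edu/proteomics" "/storage"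
    PySem.Str.replace l "\\" "/"
  else if PySem.Str.isIn "\\corexfs" folder_name then
    let f := PySem.Str.replace folder_name "\\" "/"
    let f := pvCollapse f.toList.length f
    PySem.Str.replace f "/corexfs.med.umich.edu/proteomics" "/storage"
  else if PySem.Str.isIn "=Z:" folder_name then
    let l := PySem.Str.replace folder_name "Z:" "/storage"
    PySem.Str.replace l "\\" "/"
  else if PySem.Str.isIn "Z:\\" folder_name then
    let l := PySem.Str.replace folder_name "Z:" "/storage"
    PySem.Str.replace l "\\" "/"
  else if PySem.Str.isIn "Z\\:" folder_name then
    let l := PySem.Str.replace folder_name "Z\\:" "/storage"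
    let l := PySem.Str.replace l "\\" "/"
    PySem.Str.replace l "//" "/"
  else if PySem.Str.isIn "C\\:" folder_name then
    let l := PySem.Str.replace folder_name "C\\:" ""
    let l := PySem.Str.replace l "\\" "/"
    PySem.Str.replace l "//" "/"
  else folder_name

-- ===== PORT B =====
-- Source B's chars: a backslash becomes '/'
def pvBS (c : Char) : Char := if c = '\\' then '/' else c

-- Source B's _swap_scan: one pass replacing `old` at leftmost matches and mapping '\'->'/';
-- the `while i < len(s)` loop becomes fuel recursion with fuel = len(s) (each step i grows)
def pvScan1 (old new : List Char) : Nat → List Char → List Char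
  | 0, l => l
  | _ + 1, [] => []
  | n + 1, c :: t =>
      if old.isPrefixOf (c :: t) then new ++ pvScan1 old new n ((c :: t).drop old.length)
      else pvBS c :: pvScan1 old new n t

-- Source B's _swap_collapse: one pass mapping '\'->'/' and skipping a slash after a slash
def pvScanC : Bool → List Char → List Char
  | _, [] => []
  | prev, c :: t =>
      let c' := pvBS c
      if prev && (c' == '/') then pvScanC prev t
      else c' :: pvScanC (c' == '/') t

def update_folder_linux_alt (folder_name : String) : String :=
  let s := folder_name.toList
  if PySem.Str.isIn "//corexfs" folder_name then
    String.ofList (pvScan1 "//corexfs.med.umich.edu/proteomics".toList "/storage".toList s.length s)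
  else if PySem.Str.isIn "\\corexfs" folder_name then
    PySem.Str.replace (String.ofList (pvScanC false s)) "/corexfs.med.umich.edu/proteomics" "/storage"
  else if PySem.Str.isIn "=Z:" folder_name || PySem.Str.isIn "Z:\\" folder_name then
    String.ofList (pvScan1 "Z:".toList "/storage".toList s.length s)
  else if PySem.Str.isIn "Z\\:" folder_name then
    PySem.Str.replace (String.ofList (pvScan1 "Z\\:".toList "/storage".toList s.length s)) "//" "/"
  else if PySem.Str.isIn "C\\:" folder_name then
    PySem.Str.replace (String.ofList (pvScan1 "C\\:".toList "".toList s.length s)) "//" "/"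
  else folder_name

-- ===== PRECONDITION & SPEC =====
def Spec_update_folder_linux (folder_name : String) (out : String) : Prop := out = update_folder_linux_alt folder_name
instance (folder_name : String) (out : String) : Decidable (Spec_update_folder_linux folder_name out) := by unfold Spec_update_folder_linux; infer_instance

-- ===== CLAIM (what is proved, stated in full; the proofs are below) =====
def Claim_equal_update_folder_linux : Prop := ∀ (folder_name : String), Dom_update_folder_linux folder_name → Spec_update_folder_linux folder_name (update_folder_linux folder_name)

-- ===== LEMMAS AND PROOFS =====

def pvRep (old new : List Char) : Nat → List Char → List Char
  | 0, l => l
  | _ + 1, [] => []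
  | n + 1, c :: t =>
      if old.isPrefixOf (c :: t) then new ++ pvRep old new n ((c :: t).drop old.length)
      else c :: pvRep old new n t

theorem pv_go_eq_rep (old new : List Char) (hold : old ≠ []) :
    ∀ (fuel : Nat) (l acc : List Char), l.length ≤ fuel →
      PySem.Chars.replace.go old new fuel l acc = acc.reverse ++ pvRep old new fuel l := by
  intro fuel
  induction fuel with
  | zero =>
    intro l acc h
    have : l = [] := List.eq_nil_of_length_eq_zero (Nat.le_zero.mp h)
    subst this
    simp [PySem.Chars.replace.go, pvRep]
  | succ n ih =>
    intro l acc h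
    cases l with
    | nil => simp [PySem.Chars.replace.go, pvRep]
    | cons c t =>
      rw [PySem.Chars.replace.go]
      by_cases hp : old.isPrefixOf (c :: t)
      · simp only [hp, if_true]
        rw [ih ((c :: t).drop old.length) (new.reverse ++ acc) (by
          have h1 : 1 ≤ old.length := List.length_pos_iff.mpr hold
          simp only [List.length_drop, List.length_cons] at *
          omega)]
        simp [pvRep, hp]
      · simp only [hp, if_false]
        rw [ih t (c :: acc) (by simp only [List.length_cons] at h; omega)]
        simp [pvRep, hp]

theorem pv_replace_eq_rep (old new s : List Char) (hold : old ≠ []) :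
    PySem.Chars.replace s old new = pvRep old new s.length s := by
  rw [PySem.Chars.replace]
  simp [List.isEmpty_eq_false_iff.mpr hold, pv_go_eq_rep old new hold s.length s [] le_rfl]

theorem pv_rep_bs (fuel : Nat) : ∀ (l : List Char), l.length ≤ fuel →
    pvRep ['\\'] ['/'] fuel l = l.map pvBS := by
  induction fuel with
  | zero => intro l h; have : l = [] := List.eq_nil_of_length_eq_zero (Nat.le_zero.mp h); subst this; simp [pvRep]
  | succ n ih =>
    intro l h
    cases l with
    | nil => simp [pvRep]
    | cons c t =>
      simp only [List.length_cons] at h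
      by_cases hc : c = '\\'
      · subst hc
        rw [pvRep]
        simp [List.isPrefixOf, ih t (by omega), pvBS]
      · rw [pvRep]
        have : ¬ (['\\'].isPrefixOf (c :: t)) := by simp [List.isPrefixOf]; intro hcc; exact hc hcc.symm
        simp [this, ih t (by omega), pvBS, hc]

theorem pv_map_bs_rep (old new : List Char) (hold : old ≠ []) (hnew : new.map pvBS = new) :
    ∀ (fuel : Nat) (l : List Char), l.length ≤ fuel →
      (pvRep old new fuel l).map pvBS = pvScan1 old new fuel l := by
  intro fuel
  induction fuel with
  | zero => intro l h; have : l = [] := List.eq_nil_of_length_eq_zero (Nat.le_zero.mp h); subst this; simp [pvRep, pvScan1]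
  | succ n ih =>
    intro l h
    cases l with
    | nil => simp [pvRep, pvScan1]
    | cons c t =>
      rw [pvRep, pvScan1]
      by_cases hp : old.isPrefixOf (c :: t)
      · simp only [hp, if_true, List.map_append, hnew]
        rw [ih ((c :: t).drop old.length) (by
          have h1 : 1 ≤ old.length := List.length_pos_iff.mpr hold
          simp only [List.length_drop, List.length_cons] at *
          omega)]
      · simp only [hp, Bool.false_eq_true, if_false, List.map_cons]
        rw [ih t (by simp only [List.length_cons] at h; omega)]

theorem pv_branch_scan (old new s : List Char) (hold : old ≠ []) (hnew : new.map pvBS = new) :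
    PySem.Chars.replace (PySem.Chars.replace s old new) ['\\'] ['/'] = pvScan1 old new s.length s := by
  rw [pv_replace_eq_rep old new s hold]
  rw [pv_replace_eq_rep _ _ _ (by simp)]
  rw [pv_rep_bs _ _ le_rfl]
  exact pv_map_bs_rep old new hold hnew s.length s le_rfl

def pvDD : Bool → List Char → List Char
  | _, [] => []
  | prev, c :: t =>
      if prev && (c == '/') then pvDD prev t
      else c :: pvDD (c == '/') t

theorem pv_scanC_eq_dd (l : List Char) : ∀ (prev : Bool),
    pvScanC prev l = pvDD prev (l.map pvBS) := by
  induction l with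
  | nil => intro prev; simp [pvScanC, pvDD]
  | cons c t ih => intro prev; rw [pvScanC, List.map_cons, pvDD]; by_cases hp : prev && (pvBS c == '/') <;> simp [hp, ih]

theorem pv_dd_rep (fuel : Nat) : ∀ (l : List Char) (prev : Bool), l.length ≤ fuel →
    pvDD prev (pvRep ['/', '/'] ['/'] fuel l) = pvDD prev l := by
  induction fuel with
  | zero => intro l prev h; have : l = [] := List.eq_nil_of_length_eq_zero (Nat.le_zero.mp h); subst this; simp [pvRep]
  | succ n ih =>
    intro l prev h
    cases l with
    | nil => simp [pvRep]
    | cons c t =>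
      simp only [List.length_cons] at h
      rw [pvRep]
      by_cases hp : (['/', '/'] : List Char).isPrefixOf (c :: t)
      · -- c = '/' and t = '/' :: u
        cases t with
        | nil => simp [List.isPrefixOf] at hp
        | cons d u =>
          simp only [List.isPrefixOf, List.isPrefixOf_nil_left, Bool.and_true, Bool.and_eq_true, beq_iff_eq] at hp
          obtain ⟨hc, hd⟩ := hp
          subst hc; subst hd
          have hpre : (['/', '/'] : List Char).isPrefixOf ('/' :: '/' :: u) = true := by simp [List.isPrefixOf]
          simp only [hpre, if_true]
          have hdrop : List.drop (['/', '/'] : List Char).length ('/' :: '/' :: u) = u := rfl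
          rw [hdrop]
          show pvDD prev ('/' :: pvRep ['/', '/'] ['/'] n u) = pvDD prev ('/' :: '/' :: u)
          have hstep : ∀ x, pvDD true ('/' :: x) = pvDD true x := by
            intro x; rw [pvDD]; simp
          have hu : u.length ≤ n := by simp only [List.length_cons] at h; omega
          by_cases hprev : prev
          · subst hprev
            rw [hstep, hstep, hstep, ih u true hu]
          · simp only [Bool.not_eq_true] at hprev; subst hprev
            rw [pvDD]; simp only [Bool.false_and, Bool.false_eq_true, if_false]
            conv_rhs => rw [pvDD]
            simp only [Bool.false_and, Bool.false_eq_true, if_false, beq_self_eq_true]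
            rw [hstep, ih u true hu]
      · simp only [hp, Bool.false_eq_true, if_false]
        by_cases hpc : prev && (c == '/')
        · rw [pvDD, pvDD]; simp only [hpc, if_true]
          -- state stays prev (= true)
          have : prev = true ∧ c = '/' := by simpa using hpc
          exact ih t prev (by omega) ▸ ih t prev (by omega)
        · rw [pvDD, pvDD]; simp only [hpc, Bool.false_eq_true, if_false]
          rw [ih t (c == '/') (by omega)]

theorem pv_rep_len_le (fuel : Nat) : ∀ (l : List Char),
    (pvRep ['/', '/'] ['/'] fuel l).length ≤ l.length := by
  induction fuel with
  | zero => intro l; simp [pvRep]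
  | succ n ih =>
    intro l
    cases l with
    | nil => simp [pvRep]
    | cons c t =>
      rw [pvRep]
      by_cases hp : (['/', '/'] : List Char).isPrefixOf (c :: t)
      · simp only [hp, if_true, List.length_append, List.length_cons]
        have := ih ((c :: t).drop (['/', '/'] : List Char).length)
        simp only [List.length_drop, List.length_cons] at this ⊢
        have hlen : (['/', '/'] : List Char).length = 2 := rfl
        cases t with
        | nil => simp [List.isPrefixOf] at hp
        | cons d u => simp only [List.length_cons] at *; omega
      · simp only [hp, Bool.false_eq_true, if_false, List.length_cons]
        have := ih t
        omega

theorem pv_isIn_cons (sub : List Char) (c : Char) (t : List Char)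
    (h : PySem.Chars.isIn sub t = true) : PySem.Chars.isIn sub (c :: t) = true := by
  rw [PySem.Chars.isIn_iff_infix] at h ⊢
  exact h.trans (List.suffix_cons c t).isInfix |>.trans (List.infix_refl _) |>.trans (List.infix_refl _)

theorem pv_rep_len_lt (fuel : Nat) : ∀ (l : List Char), l.length ≤ fuel →
    PySem.Chars.isIn ['/', '/'] l = true →
    (pvRep ['/', '/'] ['/'] fuel l).length < l.length := by
  induction fuel with
  | zero =>
    intro l h hin
    have : l = [] := List.eq_nil_of_length_eq_zero (Nat.le_zero.mp h)
    subst this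
    rw [PySem.Chars.isIn_iff_infix] at hin
    simp at hin
  | succ n ih =>
    intro l h hin
    cases l with
    | nil => rw [PySem.Chars.isIn_iff_infix] at hin; simp at hin
    | cons c t =>
      rw [pvRep]
      by_cases hp : (['/', '/'] : List Char).isPrefixOf (c :: t)
      · cases t with
        | nil => simp [List.isPrefixOf] at hp
        | cons d u =>
          simp only [hp, if_true]
          have hdrop : (c :: d :: u).drop (['/', '/'] : List Char).length = u := rfl
          rw [hdrop]
          have := pv_rep_len_le n u
          simp only [List.length_append, List.length_cons, List.length_nil]
          omega
      · simp only [hp, Bool.false_eq_true, if_false, List.length_cons]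
        -- occurrence must be in t
        have hint : PySem.Chars.isIn ['/', '/'] t = true := by
          rw [← PySem.Chars.exists_prefix_drop_iff_isIn] at hin ⊢
          obtain ⟨j, hj⟩ := hin
          cases j with
          | zero =>
            exfalso
            simp only [List.drop_zero] at hj
            exact hp (List.isPrefixOf_iff_prefix.mpr hj)
          | succ j' => exact ⟨j', by simpa using hj⟩
        have := ih t (by simp only [List.length_cons] at h; omega) hint
        omega

theorem pv_dd_self : ∀ (l : List Char), PySem.Chars.isIn ['/', '/'] l = false →
    ∀ (prev : Bool), (prev = true → l.head? ≠ some '/') → pvDD prev l = l := by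
  intro l
  induction l with
  | nil => intro _ prev _; simp [pvDD]
  | cons c t ih =>
    intro hin prev hhead
    have hint : PySem.Chars.isIn ['/', '/'] t = false := by
      by_contra hct
      simp only [Bool.not_eq_false] at hct
      rw [pv_isIn_cons _ c _ hct] at hin
      simp at hin
    rw [pvDD]
    by_cases hpc : prev && (c == '/')
    · exfalso
      simp only [Bool.and_eq_true, beq_iff_eq] at hpc
      exact hhead hpc.1 (by simp [hpc.2])
    · simp only [hpc, Bool.false_eq_true, if_false]
      rw [ih hint (c == '/') (by
        intro hc hcontra
        simp only [beq_iff_eq] at hc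
        subst hc
        cases t with
        | nil => simp at hcontra
        | cons d u =>
          simp only [List.head?_cons, Option.some.injEq] at hcontra
          subst hcontra
          have h2 : PySem.Chars.isIn ['/', '/'] ('/' :: '/' :: u) = true :=
            (PySem.Chars.exists_prefix_drop_iff_isIn _ _).mp ⟨0, ⟨u, rfl⟩⟩
          rw [h2] at hin
          exact absurd hin (by simp))]

theorem pv_collapse_eq_dd : ∀ (n : Nat) (t : List Char), t.length ≤ n →
    (pvCollapse n (String.ofList t)).toList = pvDD false t := by
  intro n
  induction n with
  | zero =>
    intro t h
    have : t = [] := List.eq_nil_of_length_eq_zero (Nat.le_zero.mp h)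
    subst this
    simp [pvCollapse, pvDD]
  | succ n ih =>
    intro t h
    rw [pvCollapse]
    have htl : (String.ofList t).toList = t := by simp
    by_cases hin : PySem.Str.isIn "//" (String.ofList t)
    · have hinc : PySem.Chars.isIn ['/', '/'] t = true := by
        have := (PySem.Str.isIn_iff_infix "//" (String.ofList t)).mp hin
        rw [htl] at this
        exact (PySem.Chars.isIn_iff_infix _ _).mpr this
      simp only [hin, if_true]
      have hrepl : PySem.Str.replace (String.ofList t) "//" "/" =
          String.ofList (pvRep ['/', '/'] ['/'] t.length t) := by
        rw [PySem.Str.replace, htl]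
        congr 1
        exact pv_replace_eq_rep _ _ _ (by simp)
      rw [hrepl, ih _ (by
        have := pv_rep_len_lt t.length t le_rfl hinc
        omega)]
      exact pv_dd_rep t.length t false le_rfl
    · simp only [hin, Bool.false_eq_true, if_false]
      rw [htl]
      have hinc : PySem.Chars.isIn ['/', '/'] t = false := by
        by_contra hc
        simp only [Bool.not_eq_false] at hc
        refine hin ((PySem.Str.isIn_iff_infix "//" (String.ofList t)).mpr ?_)
        rw [htl, show "//".toList = ['/', '/'] from rfl]
        exact (PySem.Chars.isIn_iff_infix _ _).mp hc
      exact (pv_dd_self t hinc false (by intro hf; cases hf)).symm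

-- two chained replaces (marker, then backslashes) equal one fused scan, at String level
theorem pv_str_branch (fn old new : String) (hold : old.toList ≠ [])
    (hnew : new.toList.map pvBS = new.toList) :
    PySem.Str.replace (PySem.Str.replace fn old new) "\\" "/" =
      String.ofList (pvScan1 old.toList new.toList fn.toList.length fn.toList) := by
  rw [PySem.Str.replace, PySem.Str.replace]
  congr 1
  simp only [String.toList_ofList]
  rw [show ("\\" : String).toList = ['\\'] from rfl, show ("/" : String).toList = ['/'] from rfl]
  exact pv_branch_scan _ _ _ hold hnew

-- backslash-map then the '//' while-loop equals the fused map+collapse scan, at String level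
theorem pv_str_collapse (fn : String) :
    (let f := PySem.Str.replace fn "\\" "/"
     pvCollapse f.toList.length f) = String.ofList (pvScanC false fn.toList) := by
  have hf : PySem.Str.replace fn "\\" "/" = String.ofList (fn.toList.map pvBS) := by
    rw [PySem.Str.replace]
    congr 1
    rw [show ("\\" : String).toList = ['\\'] from rfl, show ("/" : String).toList = ['/'] from rfl]
    rw [pv_replace_eq_rep _ _ _ (by simp)]
    exact pv_rep_bs _ _ le_rfl
  show pvCollapse (PySem.Str.replace fn "\\" "/").toList.length (PySem.Str.replace fn "\\" "/") =
    String.ofList (pvScanC false fn.toList)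
  rw [hf]
  have hlen : (String.ofList (fn.toList.map pvBS)).toList.length = (fn.toList.map pvBS).length := by simp
  rw [hlen]
  have := pv_collapse_eq_dd (fn.toList.map pvBS).length (fn.toList.map pvBS) le_rfl
  calc pvCollapse (fn.toList.map pvBS).length (String.ofList (fn.toList.map pvBS))
      = String.ofList ((pvCollapse (fn.toList.map pvBS).length (String.ofList (fn.toList.map pvBS))).toList) := by
        simp
    _ = String.ofList (pvScanC false fn.toList) := by rw [this, pv_scanC_eq_dd]

-- ===== VERDICT (by name: the statement is the Claim_ definition above) =====
theorem update_folder_linux_spec : Claim_equal_update_folder_linux := by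
  intro fn _
  unfold Spec_update_folder_linux update_folder_linux update_folder_linux_alt
  by_cases h1 : PySem.Str.isIn "//corexfs" fn <;>
    simp only [h1, if_true, Bool.false_eq_true, if_false]
  · exact pv_str_branch fn _ _ (by decide) (by decide)
  · by_cases h2 : PySem.Str.isIn "\\corexfs" fn <;>
      simp only [h2, if_true, Bool.false_eq_true, if_false]
    · rw [pv_str_collapse fn]
    · by_cases h3 : PySem.Str.isIn "=Z:" fn <;>
        by_cases h4 : PySem.Str.isIn "Z:\\" fn <;>
        simp only [h3, h4, if_true, Bool.or_self, Bool.true_or, Bool.or_true, Bool.false_or,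
          Bool.or_false, Bool.false_eq_true, if_false]
      · exact pv_str_branch fn _ _ (by decide) (by decide)
      · exact pv_str_branch fn _ _ (by decide) (by decide)
      · exact pv_str_branch fn _ _ (by decide) (by decide)
      · by_cases h5 : PySem.Str.isIn "Z\\:" fn
        · simp only [h5, if_true]
          exact congrArg (fun x => PySem.Str.replace x "//" "/")
            (pv_str_branch fn _ _ (by decide) (by decide))
        · simp only [h5, Bool.false_eq_true, if_false]
          by_cases h6 : PySem.Str.isIn "C\\:" fn
          · simp only [h6, if_true]
            exact congrArg (fun x => PySem.Str.replace x "//" "/")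
              (pv_str_branch fn _ _ (by decide) (by decide))
          · simp only [h6, Bool.false_eq_true, if_false]
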